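-- pv_equiv track=rewrite | github.com/MW55/DNA-Aeon | NOREC4DNA/norec4dna/helper/fallback_code.py | microsatellite_python
-- ===== SOURCE A (Python) =====
-- import typing
--
-- def microsatellite_python(text: typing.AnyStr, lengthToLookFor: int) -> typing.Tuple[int, str]:
--     i = 0
--     n = len(text)
--     res = 1
--     res_chars = text[:lengthToLookFor]
--     max_lenght = 0
--     while i <= n - 2 * lengthToLookFor:
--         if text[i: i + lengthToLookFor] == text[i + lengthToLookFor: i + 2 * lengthToLookFor]:
--             res += 1  # we found one
--         else:
--             if max_lenght < res:
--                 max_lenght = res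
--                 res_chars = text[i: i + lengthToLookFor]
--             res = 1
--         i += lengthToLookFor
--     if max_lenght < res:
--         max_lenght = res
--         res_chars = text[i: i + lengthToLookFor]
--     return max_lenght, res_chars
-- ===== SOURCE B (Python) =====
-- def microsatellite_python(text, lengthToLookFor):
--     L = lengthToLookFor
--     M = len(text) // L
--     if M == 0:
--         return 1, text[:L]
--     blocks = [text[k * L:(k + 1) * L] for k in range(M)]
--     # staged passes: list every run boundary, then take the first-max difference
--     starts = [0] + [k for k in range(1, M) if blocks[k] != blocks[k - 1]] + [M]
--     best_len, best_start = 0, 0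
--     for s, e in zip(starts, starts[1:]):
--         if best_len < e - s:
--             best_len, best_start = e - s, s
--     return best_len, blocks[best_start]
-- ===== Notes on version B (the rewrite author's own statement) =====
-- stated objective: alternative
-- what changed: B replaces A's single counting loop by staged passes: it slices the text into full L-blocks, builds the list of run-boundary indices (positions whose block differs from its predecessor, plus 0 and M), and returns the first maximal difference of consecutive boundaries with the block at that boundary; there is no running counter or per-step flush.
import Mathlib
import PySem

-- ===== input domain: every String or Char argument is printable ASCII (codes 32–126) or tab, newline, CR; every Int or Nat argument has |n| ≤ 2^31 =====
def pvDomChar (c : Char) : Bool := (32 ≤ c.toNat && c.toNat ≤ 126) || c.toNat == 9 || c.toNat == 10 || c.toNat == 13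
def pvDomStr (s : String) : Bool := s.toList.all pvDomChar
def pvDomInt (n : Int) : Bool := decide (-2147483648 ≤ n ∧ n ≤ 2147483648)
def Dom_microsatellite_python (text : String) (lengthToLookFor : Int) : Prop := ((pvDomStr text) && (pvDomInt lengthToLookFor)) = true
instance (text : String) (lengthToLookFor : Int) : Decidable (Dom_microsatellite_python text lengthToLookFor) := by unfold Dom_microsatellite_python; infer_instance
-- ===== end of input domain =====

-- B finds the longest run of equal adjacent L-blocks in staged passes: it lists every
-- run-boundary index, then takes the first maximal difference of consecutive boundaries;
-- same O(n) cost as A's counting loop, alternative decomposition with no run counter.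


-- ===== PORT A =====
-- A's while loop; the fuel argument only makes the recursion total (under Pre_ the
-- loop runs at most n/L ≤ n times, so fuel n+1 is never exhausted).
def pvLoopA (t : List Char) (n L : Int) (fuel : Nat) (i res : Int) (chars : List Char) (maxl : Int) : Int × List Char :=
  if i ≤ n - 2 * L then
    match fuel with
    | 0 => (maxl, chars)  -- fuel guard, unreachable under Pre_
    | fuel + 1 =>
      if PySem.List.slice t (some i) (some (i + L)) == PySem.List.slice t (some (i + L)) (some (i + 2 * L)) then
        pvLoopA t n L fuel (i + L) (res + 1) chars maxl
      else if maxl < res then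
        pvLoopA t n L fuel (i + L) 1 (PySem.List.slice t (some i) (some (i + L))) res
      else
        pvLoopA t n L fuel (i + L) 1 chars maxl
  else
    if maxl < res then (res, PySem.List.slice t (some i) (some (i + L))) else (maxl, chars)

def microsatellite_python (text : String) (lengthToLookFor : Int) : Int × String :=
  let t := text.toList
  let n : Int := t.length
  let p := pvLoopA t n lengthToLookFor (n.toNat + 1) 0 1 (PySem.List.slice t none (some lengthToLookFor)) 0
  (p.1, String.ofList p.2)

-- ===== PORT B =====
-- the for-loop over zip(starts, starts[1:]) keeping the first maximal difference
def pvArgmax : List (Nat × Nat) → Int → Nat → Int × Nat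
  | [], best, s0 => (best, s0)
  | (s, e) :: ps, best, s0 =>
    if best < (e : Int) - (s : Int) then pvArgmax ps ((e : Int) - (s : Int)) s
    else pvArgmax ps best s0

def microsatellite_python_alt (text : String) (lengthToLookFor : Int) : Int × String :=
  let t := text.toList
  let M := PySem.Int.floordiv (t.length : Int) lengthToLookFor
  if M == 0 then (1, String.ofList (PySem.List.slice t none (some lengthToLookFor)))
  else
    let blocks := (List.range M.toNat).map
      (fun k : Nat => PySem.List.slice t (some ((k : Int) * lengthToLookFor)) (some (((k : Int) + 1) * lengthToLookFor)))
    let starts := 0 :: (List.range' 1 (M.toNat - 1)).filter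
      (fun k : Nat => !(PySem.List.pyGet? blocks (k : Int) == PySem.List.pyGet? blocks ((k : Int) - 1))) ++ [M.toNat]
    let p := pvArgmax (starts.zip starts.tail) 0 0
    (p.1, String.ofList ((PySem.List.pyGet? blocks (p.2 : Int)).getD []))

-- ===== PRECONDITION & SPEC =====
-- Pre_ excludes lengthToLookFor ≤ 0, on which A's while loop never terminates
-- (i never passes n - 2*lengthToLookFor); A returns on every input with lengthToLookFor ≥ 1.
def Pre_microsatellite_python (text : String) (lengthToLookFor : Int) : Prop := 1 ≤ lengthToLookFor
instance (text : String) (lengthToLookFor : Int) : Decidable (Pre_microsatellite_python text lengthToLookFor) := by unfold Pre_microsatellite_python; infer_instance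

def pvWitness_microsatellite_python : String × Int := ("abcabcab", 3)

def Spec_microsatellite_python (text : String) (lengthToLookFor : Int) (out : Int × String) : Prop := out = microsatellite_python_alt text lengthToLookFor
instance (text : String) (lengthToLookFor : Int) (out : Int × String) : Decidable (Spec_microsatellite_python text lengthToLookFor out) := by unfold Spec_microsatellite_python; infer_instance

-- ===== CLAIM (what is proved, stated in full; the proofs are below) =====
def Claim_equal_microsatellite_python : Prop := ∀ (text : String) (lengthToLookFor : Int), Dom_microsatellite_python text lengthToLookFor → Pre_microsatellite_python text lengthToLookFor → Spec_microsatellite_python text lengthToLookFor (microsatellite_python text lengthToLookFor)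

-- ===== LEMMAS AND PROOFS =====

-- canonical run scan over the block list (proof-only middle ground between A and B)
def pvBestRun : List (List Char) → Int → List Char → Int × List Char
  | [], best, chars => (best, chars)
  | b :: bs, best, chars =>
    let g : Int := 1 + (bs.takeWhile (· == b)).length
    let rest := bs.dropWhile (· == b)
    if best < g then pvBestRun rest g b else pvBestRun rest best chars
termination_by bs => bs.length
decreasing_by all_goals
  exact Nat.lt_succ_of_le (List.length_dropWhile_le (· == b) bs)

-- A's loop abstracted to the list of remaining full blocks (used only in the proofs)
def pvRunA : List (List Char) → Int → List Char → Int → Int × List Char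
  | [], _, chars, maxl => (maxl, chars)
  | [b], res, chars, maxl => if maxl < res then (res, b) else (maxl, chars)
  | b1 :: b2 :: bs, res, chars, maxl =>
    if b1 == b2 then pvRunA (b2 :: bs) (res + 1) chars maxl
    else if maxl < res then pvRunA (b2 :: bs) 1 b1 res
    else pvRunA (b2 :: bs) 1 chars maxl

theorem pvRunA_step (bs : List (List Char)) (b : List Char) (res : Int) (chars : List Char) (maxl : Int) :
    pvRunA (b :: bs) res chars maxl =
      (if maxl < res + ((bs.takeWhile (· == b)).length : Int)
       then pvRunA (bs.dropWhile (· == b)) 1 b (res + ((bs.takeWhile (· == b)).length : Int))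
       else pvRunA (bs.dropWhile (· == b)) 1 chars maxl) := by
  induction bs generalizing b res with
  | nil => simp [pvRunA]
  | cons b2 bs ih =>
    by_cases h : b == b2
    · have hb : b = b2 := eq_of_beq h
      subst hb
      rw [show pvRunA (b :: b :: bs) res chars maxl = pvRunA (b :: bs) (res + 1) chars maxl by
        simp [pvRunA]]
      rw [ih]
      simp only [List.takeWhile, List.dropWhile, beq_self_eq_true, List.length_cons]
      have : res + 1 + ((bs.takeWhile (· == b)).length : Int)
           = res + (((bs.takeWhile (· == b)).length + 1 : Nat) : Int) := by push_cast; ring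
      rw [this]
    · have hne : b ≠ b2 := fun e => h (by simp [e])
      have h2 : (b2 == b) = false := beq_eq_false_iff_ne.mpr (Ne.symm hne)
      simp only [List.takeWhile, List.dropWhile, h2, List.length_nil, Nat.cast_zero, add_zero]
      simp [pvRunA, h]

theorem pvRunA_eq_bestRun_aux (N : Nat) : ∀ (blocks : List (List Char)), blocks.length ≤ N →
    ∀ (maxl : Int) (chars : List Char), pvRunA blocks 1 chars maxl = pvBestRun blocks maxl chars := by
  induction N with
  | zero =>
    intro blocks h maxl chars
    have : blocks = [] := List.eq_nil_of_length_eq_zero (by omega)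
    subst this
    simp [pvRunA, pvBestRun]
  | succ N ih =>
    intro blocks h maxl chars
    cases blocks with
    | nil => simp [pvRunA, pvBestRun]
    | cons b bs =>
      rw [pvRunA_step, pvBestRun]
      have hlen : (bs.dropWhile (· == b)).length ≤ N :=
        le_trans (List.length_dropWhile_le _ _) (by simp at h; omega)
      split_ifs with hlt
      · exact ih _ hlen _ _
      · exact ih _ hlen _ _

theorem pvRunA_eq_bestRun (blocks : List (List Char)) (maxl : Int) (chars : List Char) :
    pvRunA blocks 1 chars maxl = pvBestRun blocks maxl chars :=
  pvRunA_eq_bestRun_aux blocks.length blocks le_rfl maxl chars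

-- the initial chars value is never returned once at least one block exists
theorem pvBestRun_chars_irrel (b : List Char) (bs : List (List Char)) (c c' : List Char) :
    pvBestRun (b :: bs) 0 c = pvBestRun (b :: bs) 0 c' := by
  rw [pvBestRun, pvBestRun]
  rw [if_pos (by positivity), if_pos (by positivity)]

theorem pvBridgeA (t : List Char) (L : Int) (hL : 1 ≤ L) (fuel k : Nat) (res : Int) (chars : List Char) (maxl : Int)
    (hk : k < (PySem.Int.floordiv (t.length : Int) L).toNat)
    (hf : (PySem.Int.floordiv (t.length : Int) L).toNat - k ≤ fuel) :
    pvLoopA t (t.length : Int) L fuel ((k : Int) * L) res chars maxl =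
      pvRunA ((List.range' k ((PySem.Int.floordiv (t.length : Int) L).toNat - k)).map
        (fun j : Nat => PySem.List.slice t (some ((j : Int) * L)) (some (((j : Int) + 1) * L)))) res chars maxl := by
  have hL0 : 0 < L := by omega
  have hn0 : (0 : Int) ≤ (t.length : Int) := by positivity
  set n : Int := (t.length : Int) with hn
  set M := PySem.Int.floordiv n L with hMdef
  have hMe : M = n / L := PySem.Int.floordiv_eq_ediv_of_pos hL0
  have hM0 : 0 ≤ M := by rw [hMe]; exact Int.ediv_nonneg hn0 (le_of_lt hL0)
  have hMt : (M.toNat : Int) = M := Int.toNat_of_nonneg hM0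
  have hcond : ∀ j : Nat, ((j : Int) * L ≤ n - 2 * L ↔ j + 2 ≤ M.toNat) := by
    intro j
    have h1 : ((j : Int) + 2 ≤ n / L ↔ ((j : Int) + 2) * L ≤ n) := Int.le_ediv_iff_mul_le hL0
    have h2 : ((j : Int) + 2) * L = (j : Int) * L + 2 * L := by ring
    rw [h2] at h1
    omega
  induction fuel generalizing k res chars maxl with
  | zero => omega
  | succ fuel ih =>
    rw [pvLoopA]
    by_cases hc : (k : Int) * L ≤ n - 2 * L
    · have hk2 : k + 2 ≤ M.toNat := (hcond k).mp hc
      obtain ⟨c, hcc⟩ : ∃ c, M.toNat - k = c + 2 := ⟨M.toNat - k - 2, by omega⟩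
      rw [if_pos hc, hcc]
      rw [show List.range' k (c + 2) = k :: (k + 1) :: List.range' (k + 2) c by
        simp [List.range']]
      have e1 : (k : Int) * L + L = ((k + 1 : Nat) : Int) * L := by push_cast; ring
      have e2 : (k : Int) * L + 2 * L = (((k + 1 : Nat) : Int) + 1) * L := by push_cast; ring
      have e3 : ((k : Int) + 1) * L = ((k + 1 : Nat) : Int) * L := by push_cast; ring
      simp only [List.map_cons, pvRunA, e3]
      rw [e1, e2]
      have htail : List.map (fun j : Nat => PySem.List.slice t (some ((j : Int) * L)) (some (((j : Int) + 1) * L))) (List.range' (k + 1) (M.toNat - (k + 1)))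
          = PySem.List.slice t (some (((k + 1 : Nat) : Int) * L)) (some ((((k + 1 : Nat) : Int) + 1) * L)) :: List.map (fun j : Nat => PySem.List.slice t (some ((j : Int) * L)) (some (((j : Int) + 1) * L))) (List.range' (k + 2) c) := by
        rw [show M.toNat - (k + 1) = c + 1 from by omega]
        simp [List.range']
      by_cases hb : PySem.List.slice t (some ((k : Int) * L)) (some (((k + 1 : Nat) : Int) * L))
                 == PySem.List.slice t (some (((k + 1 : Nat) : Int) * L)) (some ((((k + 1 : Nat) : Int) + 1) * L))
      · rw [if_pos hb, if_pos hb, ih (k + 1) (res + 1) chars maxl (by omega) (by omega)]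
        rw [htail]
      · rw [if_neg hb, if_neg hb]
        by_cases hm : maxl < res
        · rw [if_pos hm, if_pos hm, ih (k + 1) 1 _ res (by omega) (by omega)]
          rw [htail]
        · rw [if_neg hm, if_neg hm, ih (k + 1) 1 chars maxl (by omega) (by omega)]
          rw [htail]
    · have hk1 : M.toNat - k = 1 := by
        have := (hcond k).not.mp hc
        omega
      rw [if_neg hc, hk1]
      simp only [List.range', List.map_cons, List.map_nil, pvRunA]
      have e1 : (k : Int) * L + L = ((k : Int) + 1) * L := by ring
      rw [e1]

-- ===== B-side lemmas =====

-- the mismatch positions of a block list, recursively (proof-only)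
def pvDiffPos : List (List Char) → Nat → List Nat
  | [], _ => []
  | [_], _ => []
  | a :: b :: bs, i => if a == b then pvDiffPos (b :: bs) (i + 1) else i :: pvDiffPos (b :: bs) (i + 1)

def pvStartsFrom (G : List (List Char)) (i : Nat) : List Nat :=
  i :: pvDiffPos (G.drop i) (i + 1) ++ [G.length]

theorem pvDiffPos_singleton (l : List (List Char)) (hl : l.length = 1) (i : Nat) :
    pvDiffPos l i = [] := by
  match l, hl with
  | [x], _ => rfl

-- B's filter comprehension computes pvDiffPos
theorem pvFilter_eq_diffPos (G : List (List Char)) (N : Nat) : ∀ (j : Nat), G.length - j ≤ N → j < G.length →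
    (List.range' (j + 1) (G.length - (j + 1))).filter
      (fun k : Nat => !(PySem.List.pyGet? G (k : Int) == PySem.List.pyGet? G ((k : Int) - 1)))
      = pvDiffPos (G.drop j) (j + 1) := by
  induction N with
  | zero => intro j h1 h2; omega
  | succ N ih =>
    intro j h1 h2
    by_cases hend : G.length = j + 1
    · rw [hend]
      simp only [Nat.sub_self, List.range'_zero, List.filter_nil]
      exact (pvDiffPos_singleton _ (by rw [List.length_drop]; omega) _).symm
    · have hj1 : j + 1 < G.length := by omega
      have hdj : G.drop j = G[j] :: G.drop (j + 1) := List.drop_eq_getElem_cons h2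
      have hdj1 : G.drop (j + 1) = G[j + 1] :: G.drop (j + 2) := List.drop_eq_getElem_cons hj1
      have hr : List.range' (j + 1) (G.length - (j + 1)) = (j + 1) :: List.range' (j + 2) (G.length - (j + 2)) := by
        rw [show G.length - (j + 1) = (G.length - (j + 2)) + 1 from by omega]
        rfl
      have hg1 : PySem.List.pyGet? G ((j + 1 : Nat) : Int) = some G[j + 1] := by
        rw [PySem.List.pyGet?_natCast]
        exact List.getElem?_eq_getElem hj1
      have hg0 : PySem.List.pyGet? G (((j + 1 : Nat) : Int) - 1) = some G[j] := by
        rw [show ((j + 1 : Nat) : Int) - 1 = ((j : Nat) : Int) from by push_cast; ring]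
        rw [PySem.List.pyGet?_natCast]
        exact List.getElem?_eq_getElem h2
      have ihj2 : List.filter (fun k : Nat => !(PySem.List.pyGet? G (k : Int) == PySem.List.pyGet? G ((k : Int) - 1)))
          (List.range' (j + 2) (G.length - (j + 2))) = pvDiffPos (G[j + 1] :: G.drop (j + 2)) (j + 2) := by
        have h := ih (j + 1) (by omega) hj1
        rw [hdj1] at h
        exact h
      rw [hr]
      simp only [List.filter_cons]
      rw [hg1, hg0, ihj2, hdj, hdj1, pvDiffPos]
      by_cases heq : G[j] = G[j + 1]
      · simp [heq]
      · simp [heq, Ne.symm heq]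

-- run structure of pvDiffPos
theorem pvDiffPos_run (bs : List (List Char)) : ∀ (b : List Char) (m : Nat),
    pvDiffPos (b :: bs) m =
      (if bs.dropWhile (· == b) = [] then []
       else (m + (bs.takeWhile (· == b)).length) :: pvDiffPos (bs.dropWhile (· == b)) (m + (bs.takeWhile (· == b)).length + 1)) := by
  induction bs with
  | nil => intro b m; simp [pvDiffPos, List.dropWhile]
  | cons c cs ih =>
    intro b m
    by_cases h : b == c
    · have hb : b = c := eq_of_beq h
      subst hb
      rw [show pvDiffPos (b :: b :: cs) m = pvDiffPos (b :: cs) (m + 1) from by simp [pvDiffPos]]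
      rw [ih b (m + 1)]
      simp only [List.dropWhile, List.takeWhile, beq_self_eq_true, List.length_cons]
      split_ifs with hd
      · rfl
      · have e : m + 1 + (cs.takeWhile (· == b)).length = m + ((cs.takeWhile (· == b)).length + 1) := by omega
        rw [e]
    · have h2 : (c == b) = false := by
        have hne : b ≠ c := fun e => h (by simp [e])
        exact beq_eq_false_iff_ne.mpr (Ne.symm hne)
      simp only [List.dropWhile, List.takeWhile, h2]
      rw [show pvDiffPos (b :: c :: cs) m = m :: pvDiffPos (c :: cs) (m + 1) from by simp [pvDiffPos, h]]
      simp

-- the boundary argmax equals the canonical run scan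
theorem pvArgmax_bridge (G : List (List Char)) (N : Nat) : ∀ (i : Nat), G.length - i ≤ N → i < G.length →
    ∀ (best : Int) (s0 : Nat), s0 < G.length →
    (pvArgmax ((pvStartsFrom G i).zip (pvStartsFrom G i).tail) best s0).2 < G.length ∧
    ((pvArgmax ((pvStartsFrom G i).zip (pvStartsFrom G i).tail) best s0).1,
      (G[(pvArgmax ((pvStartsFrom G i).zip (pvStartsFrom G i).tail) best s0).2]?).getD [])
      = pvBestRun (G.drop i) best ((G[s0]?).getD []) := by
  induction N with
  | zero => intro i h1 h2; omega
  | succ N ih =>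
    intro i h1 h2 best s0 hs0
    have hdi : G.drop i = G[i] :: G.drop (i + 1) := List.drop_eq_getElem_cons h2
    set b := G[i] with hbdef
    set bs := G.drop (i + 1) with hbsdef
    have hlenbs : bs.length = G.length - (i + 1) := by rw [hbsdef, List.length_drop]
    have ht_le : (bs.takeWhile (· == b)).length ≤ bs.length := (List.takeWhile_sublist _).length_le
    set t := (bs.takeWhile (· == b)).length with htdef
    have hdw : bs.dropWhile (· == b) = bs.drop t := by
      conv_rhs => rw [← List.takeWhile_append_dropWhile (p := (· == b)) (l := bs)]
      rw [List.drop_left' htdef.symm]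
    have hrhs : pvBestRun (G.drop i) best ((G[s0]?).getD [])
        = (if best < 1 + (t : Int) then pvBestRun (bs.dropWhile (· == b)) (1 + (t : Int)) b
           else pvBestRun (bs.dropWhile (· == b)) best ((G[s0]?).getD [])) := by
      rw [hdi, pvBestRun]
    by_cases hnil : bs.dropWhile (· == b) = []
    · -- single run to the end of the list
      have htb : t = bs.length := by
        rw [hdw] at hnil
        have := congrArg List.length hnil
        simp at this
        omega
      have hD : pvDiffPos (G.drop i) (i + 1) = [] := by
        rw [hdi, pvDiffPos_run, if_pos hnil]
      have hzip : (pvStartsFrom G i).zip (pvStartsFrom G i).tail = [(i, G.length)] := by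
        simp [pvStartsFrom, hD]
      rw [hzip, hrhs, hnil]
      have hg : 1 + (t : Int) = (G.length : Int) - (i : Int) := by omega
      rw [hg]
      have hA : pvArgmax [(i, G.length)] best s0
          = if best < (G.length : Int) - (i : Int) then ((G.length : Int) - (i : Int), i) else (best, s0) := by
        simp [pvArgmax]
      by_cases hlt : best < (G.length : Int) - (i : Int)
      · rw [hA, if_pos hlt, if_pos hlt]
        exact ⟨h2, by simp [pvBestRun, List.getElem?_eq_getElem h2, hbdef]⟩
      · rw [hA, if_neg hlt, if_neg hlt]
        exact ⟨hs0, by simp [pvBestRun]⟩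
    · -- a first run of length 1 + t, then recurse at position i + 1 + t
      have htlt : t < bs.length := by
        by_contra hge
        exact hnil (by rw [hdw]; exact List.drop_eq_nil_of_le (by omega))
      set m2 := i + 1 + t with hm2def
      have hm2lt : m2 < G.length := by omega
      have hdm2 : bs.dropWhile (· == b) = G.drop m2 := by
        rw [hdw, hbsdef, List.drop_drop]
      have hD : pvDiffPos (G.drop i) (i + 1) = m2 :: pvDiffPos (G.drop m2) (m2 + 1) := by
        rw [hdi, pvDiffPos_run, if_neg hnil, hdm2, ← htdef]
      have hzip : (pvStartsFrom G i).zip (pvStartsFrom G i).tail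
          = (i, m2) :: (pvStartsFrom G m2).zip (pvStartsFrom G m2).tail := by
        simp [pvStartsFrom, hD]
      rw [hzip, hrhs, hdm2]
      have hg : (m2 : Int) - (i : Int) = 1 + (t : Int) := by omega
      rw [show pvArgmax ((i, m2) :: (pvStartsFrom G m2).zip (pvStartsFrom G m2).tail) best s0
            = if best < (m2 : Int) - (i : Int)
              then pvArgmax ((pvStartsFrom G m2).zip (pvStartsFrom G m2).tail) ((m2 : Int) - (i : Int)) i
              else pvArgmax ((pvStartsFrom G m2).zip (pvStartsFrom G m2).tail) best s0 from rfl]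
      rw [hg]
      split_ifs with hlt
      · have hb0 : (G[i]?).getD [] = b := by rw [List.getElem?_eq_getElem h2, ← hbdef]; rfl
        have := ih m2 (by omega) hm2lt (1 + (t : Int)) i h2
        rw [hb0] at this
        exact this
      · exact ih m2 (by omega) hm2lt best s0 hs0

-- ===== VERDICT (by name: the statement is the Claim_ definition above) =====
theorem microsatellite_python_spec : Claim_equal_microsatellite_python := by
  intro text L hDom hPre
  have hL : 1 ≤ L := hPre
  have hL0 : 0 < L := hL
  unfold Spec_microsatellite_python
  simp only [microsatellite_python, microsatellite_python_alt]
  set t := text.toList with ht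
  set n : Int := (t.length : Int) with hn
  set M := PySem.Int.floordiv n L with hMdef
  have hn0 : (0 : Int) ≤ n := by positivity
  have hMe : M = n / L := PySem.Int.floordiv_eq_ediv_of_pos hL0
  have hM0 : 0 ≤ M := by rw [hMe]; exact Int.ediv_nonneg hn0 (le_of_lt hL0)
  have hMt : ((M.toNat : Int)) = M := Int.toNat_of_nonneg hM0
  by_cases hM : M.toNat = 0
  · -- no full block: n < L, both sides return (1, text[:L])
    have hMz : M = 0 := by omega
    have hnL : n < L := by
      by_contra hge
      have h1 : (1 : Int) ≤ n / L := by
        rw [Int.le_ediv_iff_mul_le hL0]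
        omega
      rw [← hMe] at h1
      omega
    rw [pvLoopA, if_neg (by omega), if_pos (by omega), if_pos (by simp [hMz])]
    norm_num
  · -- at least one full block
    have hM1 : 1 ≤ M.toNat := by omega
    have hfuel : M.toNat - 0 ≤ n.toNat + 1 := by
      have : M ≤ n := by rw [hMe]; exact Int.ediv_le_self L hn0
      omega
    -- A side: loop = run scan over the block list
    have hbr := pvBridgeA t L hL (n.toNat + 1) 0 1 (PySem.List.slice t none (some L)) 0
      (by rw [← hn, ← hMdef]; omega) (by rw [← hn, ← hMdef]; omega)
    simp only [Nat.cast_zero, zero_mul, Nat.sub_zero] at hbr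
    rw [← hn, ← hMdef] at hbr
    set G := (List.range M.toNat).map
      (fun k : Nat => PySem.List.slice t (some ((k : Int) * L)) (some (((k : Int) + 1) * L))) with hGdef
    have hGr : (List.range' 0 M.toNat).map
        (fun k : Nat => PySem.List.slice t (some ((k : Int) * L)) (some (((k : Int) + 1) * L))) = G := by
      rw [hGdef, List.range_eq_range']
    rw [hGr] at hbr
    have hGlen : G.length = M.toNat := by simp [hGdef]
    have hGne : G ≠ [] := by
      intro h
      rw [h] at hGlen
      simp at hGlen
      omega
    rw [hbr, pvRunA_eq_bestRun]
    -- B side: goes into the else branch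
    rw [if_neg (by simp; omega)]
    -- the filter comprehension is pvDiffPos, so starts = pvStartsFrom G 0
    have hfil := pvFilter_eq_diffPos G G.length 0 (by omega) (by omega)
    simp only [Nat.zero_add, List.drop_zero] at hfil
    have hstarts : (0 :: (List.range' 1 (M.toNat - 1)).filter
        (fun k : Nat => !(PySem.List.pyGet? G (k : Int) == PySem.List.pyGet? G ((k : Int) - 1))) ++ [M.toNat])
        = pvStartsFrom G 0 := by
      rw [pvStartsFrom]
      rw [show List.range' 1 (M.toNat - 1) = List.range' (0 + 1) (G.length - (0 + 1)) from by rw [hGlen]]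
      rw [hfil, hGlen]
      simp
    rw [hstarts]
    -- the boundary argmax is the same run scan
    obtain ⟨hlt2, hpair⟩ := pvArgmax_bridge G G.length 0 (by omega) (by omega) 0 0 (by omega)
    simp only [List.drop_zero] at hpair
    obtain ⟨g0, Grest, hGc⟩ := List.exists_cons_of_ne_nil hGne
    have hirrel : pvBestRun G 0 (PySem.List.slice t none (some L))
        = pvBestRun G 0 ((G[0]?).getD []) := by
      rw [hGc]
      exact pvBestRun_chars_irrel _ _ _ _
    rw [hirrel, ← hpair]
    rw [PySem.List.pyGet?_natCast]
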